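-- pv_equiv track=rewrite | github.com/won2lee/preProc | trns/utils_v2.py | get_sents_lenth
-- ===== SOURCE A (Python) =====
-- from itertools import chain
--
-- def get_sents_lenth(source, sbol):
--
--     if type(source[0]) is not list:
--         source = [source]
--
--     source_lengths = [len(s) for s in source]
--     XX = [list(chain(*[[i,i+1] for i,k in enumerate(s) if k in sbol[0]])) for s in source]
--     to_add = [[i+1 for i,k in enumerate(s) if k == sbol[1]] for s in source]
--     XX = [sorted(list(set(XX[i] + to_add[i]+[source_lengths[i]]))) for i in range(len(XX))]   #len(XX): Batch size
--     to_sub = [[i for i,x in enumerate(xx) if x in to_add[j]] for j, xx in enumerate(XX)]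
--     XX = [[s[i]-s[i-1] if i>0 else s[i] for i in range(len(s))] for s in XX]     # index to interval lenth(어절의 길이)
--     XX_len = [len(s) for s in XX]    # 문장의 어절 갯수
--     XX_subtracted = [[x-1 if i in to_sub[j] else x for i,x in enumerate(xx)] for j, xx in enumerate(XX)]
--     return XX_len, XX, XX_subtracted
-- ===== SOURCE B (Python) =====
-- def get_sents_lenth(source, sbol):
--     if type(source[0]) is not list:
--         source = [source]
--     lens, segs, subs = [], [], []
--     for s in source:
--         n = len(s)
--         seg, sub, prev = [], [], 0
--         for p in range(n + 1):
--             minus = p > 0 and s[p-1] == sbol[1]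
--             if p == n or s[p] in sbol[0] or (p > 0 and s[p-1] in sbol[0]) or minus:
--                 seg.append(p - prev)
--                 sub.append(p - prev - 1 if minus else p - prev)
--                 prev = p
--         lens.append(len(seg))
--         segs.append(seg)
--         subs.append(sub)
--     return lens, segs, subs
-- ===== Notes on version B (the rewrite author's own statement) =====
-- stated objective: faster
-- what changed: B replaces A's per-sentence pipeline (build cut-index lists, dedupe via set, sort, take consecutive differences, then re-scan the sorted list against to_add for the subtraction pass) by a single forward walk over positions 0..n that decides cut/minus with a local predicate on the neighbouring tokens and emits segment lengths and subtracted lengths on the fly.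
import Mathlib
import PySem

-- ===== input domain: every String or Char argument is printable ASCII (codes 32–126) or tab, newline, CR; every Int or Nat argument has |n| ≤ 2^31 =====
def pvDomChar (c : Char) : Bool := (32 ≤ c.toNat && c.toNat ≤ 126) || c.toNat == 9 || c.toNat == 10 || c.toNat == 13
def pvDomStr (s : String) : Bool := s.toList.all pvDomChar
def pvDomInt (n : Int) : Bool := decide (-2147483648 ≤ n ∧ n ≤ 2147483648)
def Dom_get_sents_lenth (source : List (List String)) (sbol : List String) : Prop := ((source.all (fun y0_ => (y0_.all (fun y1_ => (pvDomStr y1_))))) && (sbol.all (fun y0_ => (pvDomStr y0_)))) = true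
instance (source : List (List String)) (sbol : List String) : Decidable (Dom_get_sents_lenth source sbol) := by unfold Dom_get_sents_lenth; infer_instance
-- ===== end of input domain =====

-- B replaces A's sorted-set-of-cut-indices + consecutive-difference + membership re-scan by a single
-- forward walk per sentence that tests each position's cut/minus predicate directly (objective: faster).


-- ===== PORT A =====
-- `if type(source[0]) is not list: source = [source]` can never fire under this typing
-- (every element of `source` is a list), so the branch is omitted.
def get_sents_lenth (source : List (List String)) (sbol : List String) : List Int × List (List Int) × List (List Int) :=
  let source_lengths : List Int := source.map (fun s => (s.length : Int))
  let XX : List (List Int) := source.map (fun s =>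
    (((PySem.List.enumerate s 0).filter (fun ik => PySem.Str.isIn ik.2 (PySem.List.pyGetD sbol 0 ""))).map
      (fun ik => [ik.1, ik.1 + 1])).flatten)
  let to_add : List (List Int) := source.map (fun s =>
    ((PySem.List.enumerate s 0).filter (fun ik => ik.2 == PySem.List.pyGetD sbol 1 "")).map (fun ik => ik.1 + 1))
  let XX2 : List (List Int) := (PySem.List.pyRange 0 (XX.length : Int) 1).map (fun i =>
    PySem.List.sorted (PySem.Set.ofList (PySem.List.pyGetD XX i [] ++ PySem.List.pyGetD to_add i [] ++ [PySem.List.pyGetD source_lengths i 0])) (fun x => x) false)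
  let to_sub : List (List Int) := (PySem.List.enumerate XX2 0).map (fun jxx =>
    ((PySem.List.enumerate jxx.2 0).filter (fun ix => decide (ix.2 ∈ PySem.List.pyGetD to_add jxx.1 []))).map (fun ix => ix.1))
  let XX3 : List (List Int) := XX2.map (fun s =>
    (PySem.List.pyRange 0 (s.length : Int) 1).map (fun i =>
      if i > 0 then PySem.List.pyGetD s i 0 - PySem.List.pyGetD s (i - 1) 0 else PySem.List.pyGetD s i 0))
  let XX_len : List Int := XX3.map (fun s => (s.length : Int))
  let XX_subtracted : List (List Int) := (PySem.List.enumerate XX3 0).map (fun jxx =>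
    (PySem.List.enumerate jxx.2 0).map (fun ix =>
      if decide (ix.1 ∈ PySem.List.pyGetD to_sub jxx.1 []) then ix.2 - 1 else ix.2))
  (XX_len, XX3, XX_subtracted)

-- ===== PORT B =====
-- one forward walk over positions 0..n per sentence; cut/minus decided by a local predicate
def pvAltSent (sbol : List String) (s : List String) : List Int × List Int × Int :=
  let n : Int := (s.length : Int)
  (PySem.List.pyRange 0 (n + 1) 1).foldl (fun (acc : List Int × List Int × Int) p =>
    let minus : Bool := decide (p > 0) && (PySem.List.pyGetD s (p - 1) "" == PySem.List.pyGetD sbol 1 "")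
    if p == n || PySem.Str.isIn (PySem.List.pyGetD s p "") (PySem.List.pyGetD sbol 0 "") ||
       (decide (p > 0) && PySem.Str.isIn (PySem.List.pyGetD s (p - 1) "") (PySem.List.pyGetD sbol 0 "")) || minus then
      (acc.1 ++ [p - acc.2.2], acc.2.1 ++ [if minus then p - acc.2.2 - 1 else p - acc.2.2], p)
    else acc) ([], [], 0)

def get_sents_lenth_alt (source : List (List String)) (sbol : List String) : List Int × List (List Int) × List (List Int) :=
  source.foldl (fun (acc : List Int × List (List Int) × List (List Int)) s =>
    let r := pvAltSent sbol s
    (acc.1 ++ [(r.1.length : Int)], acc.2.1 ++ [r.1], acc.2.2 ++ [r.2.1])) ([], [], [])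

-- ===== PRECONDITION & SPEC =====
-- Pre_ excludes exactly the inputs where Python A raises IndexError: an empty source,
-- and sbol shorter than 2 while some sentence is nonempty (sbol[0]/sbol[1] are then evaluated).
def Pre_get_sents_lenth (source : List (List String)) (sbol : List String) : Prop :=
  source ≠ [] ∧ (2 ≤ sbol.length ∨ ∀ s ∈ source, s = [])
instance (source : List (List String)) (sbol : List String) : Decidable (Pre_get_sents_lenth source sbol) := by unfold Pre_get_sents_lenth; infer_instance
def pvWitness_get_sents_lenth : List (List String) × List String := ([["ab", "_", "x"], []], ["_", "x"])
def Spec_get_sents_lenth (source : List (List String)) (sbol : List String) (out : List Int × List (List Int) × List (List Int)) : Prop := out = get_sents_lenth_alt source sbol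
instance (source : List (List String)) (sbol : List String) (out : List Int × List (List Int) × List (List Int)) : Decidable (Spec_get_sents_lenth source sbol out) := by unfold Spec_get_sents_lenth; infer_instance

-- ===== CLAIM (what is proved, stated in full; the proofs are below) =====
def Claim_equal_get_sents_lenth : Prop := ∀ (source : List (List String)) (sbol : List String), Dom_get_sents_lenth source sbol → Pre_get_sents_lenth source sbol → Spec_get_sents_lenth source sbol (get_sents_lenth source sbol)

-- ===== LEMMAS AND PROOFS =====
-- A-side per-sentence pieces (proof helpers)
@[reducible] def pvXX1 (sb0 : String) (s : List String) : List Int :=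
  (((PySem.List.enumerate s 0).filter (fun ik => PySem.Str.isIn ik.2 sb0)).map (fun ik => [ik.1, ik.1 + 1])).flatten
@[reducible] def pvAdd (sb1 : String) (s : List String) : List Int :=
  ((PySem.List.enumerate s 0).filter (fun ik => ik.2 == sb1)).map (fun ik => ik.1 + 1)
@[reducible] def pvCA (sb0 sb1 : String) (s : List String) : List Int :=
  PySem.List.sorted (PySem.Set.ofList (pvXX1 sb0 s ++ pvAdd sb1 s ++ [(s.length : Int)])) (fun x => x) false
@[reducible] def pvSegA (sb0 sb1 : String) (s : List String) : List Int :=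
  (PySem.List.pyRange 0 ((pvCA sb0 sb1 s).length : Int) 1).map (fun i =>
    if i > 0 then PySem.List.pyGetD (pvCA sb0 sb1 s) i 0 - PySem.List.pyGetD (pvCA sb0 sb1 s) (i - 1) 0
    else PySem.List.pyGetD (pvCA sb0 sb1 s) i 0)
@[reducible] def pvToSubA (sb0 sb1 : String) (s : List String) : List Int :=
  ((PySem.List.enumerate (pvCA sb0 sb1 s) 0).filter (fun ix => decide (ix.2 ∈ pvAdd sb1 s))).map (fun ix => ix.1)
@[reducible] def pvSubA (sb0 sb1 : String) (s : List String) : List Int :=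
  (PySem.List.enumerate (pvSegA sb0 sb1 s) 0).map (fun ix =>
    if decide (ix.1 ∈ pvToSubA sb0 sb1 s) then ix.2 - 1 else ix.2)

-- B-side per-sentence pieces
def pvCutI (sb0 sb1 : String) (s : List String) (q : Int) : Bool :=
  q == (s.length : Int) || PySem.Str.isIn (PySem.List.pyGetD s q "") sb0 ||
  (decide (q > 0) && PySem.Str.isIn (PySem.List.pyGetD s (q - 1) "") sb0) ||
  (decide (q > 0) && (PySem.List.pyGetD s (q - 1) "" == sb1))
def pvMinI (sb1 : String) (s : List String) (q : Int) : Bool :=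
  decide (q > 0) && (PySem.List.pyGetD s (q - 1) "" == sb1)
def pvC (sb0 sb1 : String) (s : List String) : List Int :=
  ((List.range (s.length + 1)).map (fun p : Nat => (p : Int))).filter (pvCutI sb0 sb1 s)
def pvWalkSeg (prev : Int) : List Int → List Int
  | [] => []
  | q :: r => (q - prev) :: pvWalkSeg q r
def pvWalkSub (m : Int → Bool) (prev : Int) : List Int → List Int
  | [] => []
  | q :: r => (if m q then q - prev - 1 else q - prev) :: pvWalkSub m q r
def pvWalkLast (prev : Int) : List Int → Int
  | [] => prev
  | q :: r => pvWalkLast q r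

-- membership characterisations
theorem pv_mem_XX1 (sb0 : String) (s : List String) (x : Int) :
    x ∈ pvXX1 sb0 s ↔ ∃ k, ∃ _ : k < s.length, PySem.Str.isIn s[k] sb0 = true ∧ (x = (k : Int) ∨ x = (k : Int) + 1) := by
  unfold pvXX1
  simp only [List.mem_flatten, List.mem_map, List.mem_filter, PySem.List.mem_enumerate_iff]
  constructor
  · rintro ⟨l, ⟨ik, ⟨⟨k, hk, rfl⟩, hin⟩, rfl⟩, hx⟩
    simp only [List.mem_cons] at hx
    exact ⟨k, hk, hin, by simpa using hx⟩
  · rintro ⟨k, hk, hin, hx⟩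
    exact ⟨[(k : Int), (k : Int) + 1], ⟨((k : Int), s[k]), ⟨⟨k, hk, by simp⟩, hin⟩, by simp⟩,
      by simpa using hx⟩

theorem pv_mem_Add (sb1 : String) (s : List String) (x : Int) :
    x ∈ pvAdd sb1 s ↔ ∃ k, ∃ _ : k < s.length, s[k] = sb1 ∧ x = (k : Int) + 1 := by
  unfold pvAdd
  simp only [List.mem_map, List.mem_filter, PySem.List.mem_enumerate_iff, beq_iff_eq]
  constructor
  · rintro ⟨ik, ⟨⟨k, hk, rfl⟩, hin⟩, rfl⟩
    exact ⟨k, hk, hin, by simp⟩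
  · rintro ⟨k, hk, hin, rfl⟩
    exact ⟨((k : Int), s[k]), ⟨⟨k, hk, by simp⟩, hin⟩, by simp⟩

theorem pv_minI_iff (sb1 : String) (s : List String) (p : Nat) (hp : p ≤ s.length) :
    pvMinI sb1 s (p : Int) = true ↔ ((p : Int) ∈ pvAdd sb1 s) := by
  unfold pvMinI
  cases p with
  | zero =>
    simp only [Nat.cast_zero, pv_mem_Add]
    constructor
    · intro h; simp at h
    · rintro ⟨k, hk, _, hx⟩; omega
  | succ j =>
    have hj : j < s.length := by omega
    have hc : ((j + 1 : Nat) : Int) - 1 = (j : Int) := by push_cast; ring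
    simp only [hc, PySem.List.pyGetD_natCast, List.getD_eq_getElem?_getD,
      List.getElem?_eq_getElem hj, Option.getD_some, pv_mem_Add]
    constructor
    · intro h
      simp only [Bool.and_eq_true, beq_iff_eq, decide_eq_true_eq] at h
      exact ⟨j, hj, h.2, by push_cast; ring⟩
    · rintro ⟨k, hk, hkv, hx⟩
      have : k = j := by omega
      subst this
      simp [hkv]

theorem pv_cutI_iff (sb0 sb1 : String) (s : List String) (p : Nat) (hp : p ≤ s.length) :
    pvCutI sb0 sb1 s (p : Int) = true ↔
      ((p : Int) ∈ pvXX1 sb0 s ∨ (p : Int) ∈ pvAdd sb1 s ∨ (p : Int) = (s.length : Int)) := by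
  have hmin := pv_minI_iff sb1 s p hp
  unfold pvMinI at hmin
  unfold pvCutI
  by_cases hn : p = s.length
  · subst hn
    exact ⟨fun _ => Or.inr (Or.inr rfl), fun _ => by simp⟩
  · have hlt : p < s.length := by omega
    have hget : PySem.List.pyGetD s ((p : Nat) : Int) "" = s[p] := by
      rw [PySem.List.pyGetD_natCast, List.getD_eq_getElem?_getD, List.getElem?_eq_getElem hlt]
      rfl
    constructor
    · intro h
      simp only [Bool.or_eq_true, or_assoc] at h
      rcases h with h | h | h | h
      · have : (p : Int) = (s.length : Int) := beq_iff_eq.mp h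
        exact absurd (by exact_mod_cast this) hn
      · rw [hget] at h
        exact Or.inl ((pv_mem_XX1 _ _ _).mpr ⟨p, hlt, h, Or.inl rfl⟩)
      · rw [Bool.and_eq_true] at h
        obtain ⟨hp0, hin⟩ := h
        have hp0' : 0 < p := by
          have := of_decide_eq_true hp0; omega
        have hplt : p - 1 < s.length := by omega
        have hc : ((p : Nat) : Int) - 1 = ((p - 1 : Nat) : Int) := by omega
        rw [hc, PySem.List.pyGetD_natCast, List.getD_eq_getElem?_getD,
          List.getElem?_eq_getElem hplt] at hin
        refine Or.inl ((pv_mem_XX1 _ _ _).mpr ⟨p - 1, hplt, by simpa using hin, Or.inr (by omega)⟩)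
      · exact Or.inr (Or.inl (hmin.mp h))
    · intro h
      simp only [Bool.or_eq_true, or_assoc]
      rcases h with h | h | h
      · rcases (pv_mem_XX1 _ _ _).mp h with ⟨k, hk, hin, hx | hx⟩
        · have : p = k := by omega
          subst this
          exact Or.inr (Or.inl (by rw [hget]; exact hin))
        · have hp0 : 0 < p := by omega
          have hk' : k = p - 1 := by omega
          subst hk'
          refine Or.inr (Or.inr (Or.inl ?_))
          rw [Bool.and_eq_true]
          refine ⟨by simp; exact_mod_cast hp0, ?_⟩
          have hc : ((p : Nat) : Int) - 1 = ((p - 1 : Nat) : Int) := by omega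
          rw [hc, PySem.List.pyGetD_natCast, List.getD_eq_getElem?_getD,
            List.getElem?_eq_getElem (by omega : p - 1 < s.length)]
          simpa using hin
      · exact Or.inr (Or.inr (Or.inr (hmin.mpr h)))
      · exact absurd (by exact_mod_cast h) hn

-- the sorted set of A's cut indices is exactly the filtered position list
theorem pv_mem_C (sb0 sb1 : String) (s : List String) (x : Int) :
    x ∈ pvC sb0 sb1 s ↔ ∃ p : Nat, p ≤ s.length ∧ pvCutI sb0 sb1 s (p : Int) = true ∧ x = (p : Int) := by
  unfold pvC
  simp only [List.mem_filter, List.mem_map, List.mem_range]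
  constructor
  · rintro ⟨⟨p, hp, rfl⟩, hc⟩
    exact ⟨p, by omega, hc, rfl⟩
  · rintro ⟨p, hp, hc, rfl⟩
    exact ⟨⟨p, by omega, rfl⟩, hc⟩

-- the sorted set of A's cut indices is exactly the filtered position list
theorem pv_CA_eq_C (sb0 sb1 : String) (s : List String) : pvCA sb0 sb1 s = pvC sb0 sb1 s := by
  have hC : (pvC sb0 sb1 s).Pairwise (· < ·) := by
    unfold pvC
    exact List.Pairwise.filter _ (List.pairwise_map.mpr
      (List.pairwise_lt_range.imp (fun hab => by exact_mod_cast hab)))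
  unfold pvCA
  apply PySem.List.sorted_eq_of_perm_of_pairwise_lt
  · rw [List.perm_ext_iff_of_nodup (hC.imp ne_of_lt) (PySem.Set.nodup_ofList _)]
    intro x
    rw [PySem.Set.mem_ofList, pv_mem_C]
    simp only [List.mem_append, List.mem_singleton]
    constructor
    · rintro ⟨p, hp, hcut, rfl⟩
      have h := (pv_cutI_iff sb0 sb1 s p hp).mp hcut
      tauto
    · intro h
      rcases h with (h | h) | h
      · rcases (pv_mem_XX1 _ _ _).mp h with ⟨k, hk, hin, rfl | rfl⟩
        · exact ⟨k, by omega, (pv_cutI_iff sb0 sb1 s k (by omega)).mpr (Or.inl h), rfl⟩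
        · refine ⟨k + 1, by omega, (pv_cutI_iff sb0 sb1 s (k+1) (by omega)).mpr ?_, by push_cast; ring⟩
          rw [show ((k + 1 : Nat) : Int) = (k : Int) + 1 by push_cast; ring]
          exact Or.inl h
      · rcases (pv_mem_Add _ _ _).mp h with ⟨k, hk, hv, rfl⟩
        refine ⟨k + 1, by omega, (pv_cutI_iff sb0 sb1 s (k+1) (by omega)).mpr ?_, by push_cast; ring⟩
        rw [show ((k + 1 : Nat) : Int) = (k : Int) + 1 by push_cast; ring]
        exact Or.inr (Or.inl h)
      · subst h
        exact ⟨s.length, by omega, (pv_cutI_iff sb0 sb1 s s.length (by omega)).mpr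
          (Or.inr (Or.inr rfl)), rfl⟩
  · simpa using hC

-- walk characterisations
theorem pv_length_walkSeg (prev : Int) (cs : List Int) : (pvWalkSeg prev cs).length = cs.length := by
  induction cs generalizing prev with
  | nil => rfl
  | cons q r ih => simp [pvWalkSeg, ih]

theorem pv_length_walkSub (m : Int → Bool) (prev : Int) (cs : List Int) : (pvWalkSub m prev cs).length = cs.length := by
  induction cs generalizing prev with
  | nil => rfl
  | cons q r ih => simp [pvWalkSub, ih]

theorem pv_walkSeg_getElem? (prev : Int) (cs : List Int) (i : Nat) :
    (pvWalkSeg prev cs)[i]? = cs[i]?.map (fun x => x - (if i = 0 then prev else cs.getD (i-1) 0)) := by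
  induction cs generalizing prev i with
  | nil => simp [pvWalkSeg]
  | cons q r ih =>
    cases i with
    | zero => simp [pvWalkSeg]
    | succ j =>
      simp only [pvWalkSeg, List.getElem?_cons_succ, ih]
      cases j <;> simp

theorem pv_walkSub_getElem? (m : Int → Bool) (prev : Int) (cs : List Int) (i : Nat) :
    (pvWalkSub m prev cs)[i]? = cs[i]?.map (fun x =>
      if m x then x - (if i = 0 then prev else cs.getD (i-1) 0) - 1
      else x - (if i = 0 then prev else cs.getD (i-1) 0)) := by
  induction cs generalizing prev i with
  | nil => simp [pvWalkSub]
  | cons q r ih =>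
    cases i with
    | zero => simp [pvWalkSub]
    | succ j =>
      simp only [pvWalkSub, List.getElem?_cons_succ, ih]
      cases j <;> simp

theorem pv_diffs_eq (cs : List Int) :
    (PySem.List.pyRange 0 ((cs.length : Nat) : Int) 1).map (fun i =>
      if i > 0 then PySem.List.pyGetD cs i 0 - PySem.List.pyGetD cs (i - 1) 0
      else PySem.List.pyGetD cs i 0) = pvWalkSeg 0 cs := by
  apply List.ext_getElem?
  intro k
  by_cases hk : k < cs.length
  · rw [PySem.List.getElem?_map_pyRange_zero _ _ _ hk, pv_walkSeg_getElem?,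
      List.getElem?_eq_getElem hk]
    simp only [Option.map_some]
    cases k with
    | zero =>
      have h0 := PySem.List.pyGetD_natCast cs 0 0
      rw [List.getD_eq_getElem?_getD, List.getElem?_eq_getElem hk] at h0
      simp only [Nat.cast_zero, Option.getD_some] at h0
      simp [h0]
    | succ j =>
      have hpos : (0 : Int) < ((j + 1 : Nat) : Int) := by positivity
      have hc : ((j + 1 : Nat) : Int) - 1 = ((j : Nat) : Int) := by push_cast; ring
      rw [if_pos hpos, hc, PySem.List.pyGetD_natCast, PySem.List.pyGetD_natCast]
      have hj : j < cs.length := by omega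
      simp [List.getD_eq_getElem?_getD, List.getElem?_eq_getElem hk, List.getElem?_eq_getElem hj]
  · rw [List.getElem?_eq_none (by simp [PySem.List.length_pyRange_one]; omega),
      List.getElem?_eq_none (by rw [pv_length_walkSeg]; omega)]

-- A's indexed difference list is the walk
theorem pv_segA_eq (sb0 sb1 : String) (s : List String) :
    pvSegA sb0 sb1 s = pvWalkSeg 0 (pvC sb0 sb1 s) := by
  unfold pvSegA
  rw [pv_CA_eq_C]
  exact pv_diffs_eq _

theorem pv_subA_eq (sb0 sb1 : String) (s : List String) :
    pvSubA sb0 sb1 s = pvWalkSub (pvMinI sb1 s) 0 (pvC sb0 sb1 s) := by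
  unfold pvSubA pvToSubA
  rw [pv_segA_eq, pv_CA_eq_C]
  set C := pvC sb0 sb1 s with hCdef
  apply List.ext_getElem?
  intro k
  by_cases hk : k < C.length
  · rw [List.getElem?_map, PySem.List.getElem?_enumerate, pv_walkSeg_getElem?, pv_walkSub_getElem?,
      List.getElem?_eq_getElem hk]
    simp only [Option.map_some, zero_add]
    obtain ⟨p, hp, hpe⟩ : ∃ p : Nat, p ≤ s.length ∧ C[k] = (p : Int) := by
      have hm : C[k] ∈ C := List.getElem_mem hk
      obtain ⟨p, hp1, _, hp3⟩ := (pv_mem_C sb0 sb1 s (C[k])).mp hm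
      exact ⟨p, hp1, hp3⟩
    have hmem : ((k : Int) ∈ ((PySem.List.enumerate C 0).filter
        (fun ix => decide (ix.2 ∈ pvAdd sb1 s))).map (fun ix => ix.1)) ↔ C[k] ∈ pvAdd sb1 s := by
      simp only [List.mem_map, List.mem_filter, PySem.List.mem_enumerate_iff, decide_eq_true_eq]
      constructor
      · rintro ⟨ix, ⟨⟨j, hj, rfl⟩, hmemA⟩, h1⟩
        have : j = k := by simpa using h1
        subst this
        exact hmemA
      · intro hmemA
        exact ⟨((0 : Int) + (k : Int), C[k]), ⟨⟨k, hk, rfl⟩, hmemA⟩, by simp⟩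
    have hmin : pvMinI sb1 s C[k] = true ↔ C[k] ∈ pvAdd sb1 s := by
      rw [hpe]
      exact pv_minI_iff sb1 s p hp
    by_cases hA : C[k] ∈ pvAdd sb1 s
    · rw [if_pos (by simp only [decide_eq_true_eq]; exact hmem.mpr hA), if_pos (hmin.mpr hA)]
    · rw [if_neg (by simp only [decide_eq_true_eq]; exact fun h => hA (hmem.mp h)),
        if_neg (fun h => hA (hmin.mp h))]
  · rw [List.getElem?_eq_none (by simp [PySem.List.length_enumerate, pv_length_walkSeg]; omega),
      List.getElem?_eq_none (by rw [pv_length_walkSub]; omega)]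

-- B's fold is the walk
theorem pv_foldl_walk (m : Int → Bool) (cs : List Int) (a b : List Int) (prev : Int) :
    cs.foldl (fun acc q => (acc.1 ++ [q - acc.2.2],
        acc.2.1 ++ [if m q then q - acc.2.2 - 1 else q - acc.2.2], q)) (a, b, prev)
      = (a ++ pvWalkSeg prev cs, b ++ pvWalkSub m prev cs, pvWalkLast prev cs) := by
  induction cs generalizing a b prev with
  | nil => simp [pvWalkSeg, pvWalkSub, pvWalkLast]
  | cons q r ih => simp [pvWalkSeg, pvWalkSub, pvWalkLast, ih]

theorem pv_altSent_eq (sbol : List String) (s : List String) :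
    pvAltSent sbol s =
      (pvWalkSeg 0 (pvC (PySem.List.pyGetD sbol 0 "") (PySem.List.pyGetD sbol 1 "") s),
       pvWalkSub (pvMinI (PySem.List.pyGetD sbol 1 "") s) 0 (pvC (PySem.List.pyGetD sbol 0 "") (PySem.List.pyGetD sbol 1 "") s),
       pvWalkLast 0 (pvC (PySem.List.pyGetD sbol 0 "") (PySem.List.pyGetD sbol 1 "") s)) := by
  unfold pvAltSent
  simp only []
  have hcast : ((s.length : Int)) + 1 = ((s.length + 1 : Nat) : Int) := by push_cast; ring
  rw [hcast, PySem.List.pyRange_zero_nat, ← List.foldl_filter, pv_foldl_walk]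
  simp only [List.nil_append]
  rfl

-- top-level collapses of A's index-juggling
theorem pv_collapse3 {a : Type} (xs : List a) (f g : a → List Int) (h : a → Int)
    (G : List Int → List Int → Int → List Int) :
    (PySem.List.pyRange 0 (((xs.map f).length : Nat) : Int) 1).map (fun i =>
        G (PySem.List.pyGetD (xs.map f) i []) (PySem.List.pyGetD (xs.map g) i [])
          (PySem.List.pyGetD (xs.map h) i 0))
      = xs.map (fun x => G (f x) (g x) (h x)) := by
  apply List.ext_getElem?
  intro k
  by_cases hk : k < xs.length
  · rw [PySem.List.getElem?_map_pyRange_zero _ _ _ (by simpa using hk : k < (xs.map f).length),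
      List.getElem?_map, List.getElem?_eq_getElem hk]
    simp only [Option.map_some]
    have e1 : (xs.map f).getD k [] = f xs[k] := by
      rw [List.getD_eq_getElem?_getD, List.getElem?_eq_getElem (by simpa using hk : k < (xs.map f).length)]
      simp
    have e2 : (xs.map g).getD k [] = g xs[k] := by
      rw [List.getD_eq_getElem?_getD, List.getElem?_eq_getElem (by simpa using hk : k < (xs.map g).length)]
      simp
    have e3 : (xs.map h).getD k 0 = h xs[k] := by
      rw [List.getD_eq_getElem?_getD, List.getElem?_eq_getElem (by simpa using hk : k < (xs.map h).length)]
      simp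
    rw [PySem.List.pyGetD_natCast, PySem.List.pyGetD_natCast, PySem.List.pyGetD_natCast, e1, e2, e3]
  · rw [List.getElem?_eq_none (by simp [PySem.List.length_pyRange_one]; omega),
      List.getElem?_eq_none (by simp; omega)]

theorem pv_collapse_enum {a b : Type} (xs : List a) (f : a → b) (g : a → List Int)
    (G : List Int → b → cs) :
    (PySem.List.enumerate (xs.map f) 0).map (fun jxx =>
        G (PySem.List.pyGetD (xs.map g) jxx.1 []) jxx.2)
      = xs.map (fun x => G (g x) (f x)) := by
  apply List.ext_getElem?
  intro k
  by_cases hk : k < xs.length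
  · rw [List.getElem?_map, PySem.List.getElem?_enumerate]
    simp only [List.getElem?_map, List.getElem?_eq_getElem hk, Option.map_some, zero_add]
    have e : PySem.List.pyGetD (xs.map g) ((k : Nat) : Int) [] = g xs[k] := by
      rw [PySem.List.pyGetD_natCast, List.getD_eq_getElem?_getD,
        List.getElem?_eq_getElem (by simpa using hk : k < (xs.map g).length)]
      simp
    rw [e]
  · rw [List.getElem?_eq_none (by simp [PySem.List.length_enumerate]; omega),
      List.getElem?_eq_none (by simp; omega)]

theorem pv_A_eq (source : List (List String)) (sbol : List String) :
    get_sents_lenth source sbol =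
      (source.map (fun s => ((pvSegA (PySem.List.pyGetD sbol 0 "") (PySem.List.pyGetD sbol 1 "") s).length : Int)),
       source.map (fun s => pvSegA (PySem.List.pyGetD sbol 0 "") (PySem.List.pyGetD sbol 1 "") s),
       source.map (fun s => pvSubA (PySem.List.pyGetD sbol 0 "") (PySem.List.pyGetD sbol 1 "") s)) := by
  simp only [get_sents_lenth]
  rw [pv_collapse3 source
    (fun s => (((PySem.List.enumerate s 0).filter (fun ik => PySem.Str.isIn ik.2 (PySem.List.pyGetD sbol 0 ""))).map (fun ik => [ik.1, ik.1 + 1])).flatten)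
    (fun s => ((PySem.List.enumerate s 0).filter (fun ik => ik.2 == PySem.List.pyGetD sbol 1 "")).map (fun ik => ik.1 + 1))
    (fun s => (s.length : Int))
    (fun x y z => PySem.List.sorted (PySem.Set.ofList (x ++ y ++ [z])) (fun t => t) false)]
  rw [List.map_map (f := pvCA (PySem.List.pyGetD sbol 0 "") (PySem.List.pyGetD sbol 1 ""))
    (g := fun s => List.map (fun i => if i > 0 then PySem.List.pyGetD s i 0 - PySem.List.pyGetD s (i - 1) 0 else PySem.List.pyGetD s i 0) (PySem.List.pyRange 0 (s.length : Int) 1))]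
  rw [pv_collapse_enum source
    (pvCA (PySem.List.pyGetD sbol 0 "") (PySem.List.pyGetD sbol 1 ""))
    (pvAdd (PySem.List.pyGetD sbol 1 ""))
    (fun tadd xx => ((PySem.List.enumerate xx 0).filter (fun ix => decide (ix.2 ∈ tadd))).map (fun ix => ix.1))]
  rw [pv_collapse_enum source
    ((fun s => List.map (fun i => if i > 0 then PySem.List.pyGetD s i 0 - PySem.List.pyGetD s (i - 1) 0 else PySem.List.pyGetD s i 0) (PySem.List.pyRange 0 (s.length : Int) 1)) ∘ pvCA (PySem.List.pyGetD sbol 0 "") (PySem.List.pyGetD sbol 1 ""))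
    (pvToSubA (PySem.List.pyGetD sbol 0 "") (PySem.List.pyGetD sbol 1 ""))
    (fun tsub seg => (PySem.List.enumerate seg 0).map (fun ix => if decide (ix.1 ∈ tsub) then ix.2 - 1 else ix.2))]
  rw [List.map_map]
  rfl

theorem pv_B_eq (source : List (List String)) (sbol : List String) :
    get_sents_lenth_alt source sbol =
      (source.map (fun s => ((pvAltSent sbol s).1.length : Int)),
       source.map (fun s => (pvAltSent sbol s).1),
       source.map (fun s => (pvAltSent sbol s).2.1)) := by
  unfold get_sents_lenth_alt
  have h : ∀ (xs : List (List String)) (a : List Int) (b c3 : List (List Int)),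
      xs.foldl (fun (acc : List Int × List (List Int) × List (List Int)) s =>
        (acc.1 ++ [((pvAltSent sbol s).1.length : Int)], acc.2.1 ++ [(pvAltSent sbol s).1],
         acc.2.2 ++ [(pvAltSent sbol s).2.1])) (a, b, c3)
      = (a ++ xs.map (fun s => ((pvAltSent sbol s).1.length : Int)),
         b ++ xs.map (fun s => (pvAltSent sbol s).1),
         c3 ++ xs.map (fun s => (pvAltSent sbol s).2.1)) := by
    intro xs
    induction xs with
    | nil => intro a b c3; simp
    | cons x r ih => intro a b c3; simp [ih]
  simpa using h source [] [] []

-- ===== VERDICT (by name: the statement is the Claim_ definition above) =====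
theorem get_sents_lenth_spec : Claim_equal_get_sents_lenth := by
  intro source sbol _ _
  unfold Spec_get_sents_lenth
  rw [pv_A_eq, pv_B_eq]
  refine congrArg₂ Prod.mk ?_ (congrArg₂ Prod.mk ?_ ?_) <;> apply List.map_congr_left <;> intro s _
  · rw [pv_altSent_eq, pv_segA_eq]
  · rw [pv_altSent_eq, pv_segA_eq]
  · rw [pv_altSent_eq, pv_subA_eq]
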